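-- pv_equiv track=rewrite | github.com/GoogleCloudPlatform/vertex-ai-samples | notebooks/community/model_garden/docker_source_codes/notebook_util/common_util.py | get_quota_id
-- ===== SOURCE A (Python) =====
-- def get_quota_id(
--     accelerator_type: str,
--     is_for_training: bool,
--     is_spot: bool = False,
--     is_restricted_image: bool = False,
--     is_dynamic_workload_scheduler: bool = False,
-- ) -> str:
--   """Returns the quota id for a given accelerator type and the use case.
--
--   Args:
--     accelerator_type: The accelerator type.
--     is_for_training: Whether the resource is used for training. Set false for
--       serving use case.
--     is_spot: Whether the resource is used with Spot.
--     is_restricted_image: Whether the image is hosted in `vertex-ai-restricted`.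
--     is_dynamic_workload_scheduler: Whether the resource is used with Dynamic
--       Workload Scheduler.
--
--   Returns:
--     The quota id.
--   """
--   accelerator_map = {
--       "NVIDIA_TESLA_V100": "V100GPUs",
--       "NVIDIA_TESLA_P100": "P100GPUs",
--       "NVIDIA_L4": "L4GPUs",
--       "NVIDIA_TESLA_A100": "A100GPUs",
--       "NVIDIA_A100_80GB": "A10080GBGPUs",
--       "NVIDIA_H100_80GB": "H100GPUs",
--       "NVIDIA_H100_MEGA_80GB": "H100MEGAGPUs",
--       "NVIDIA_H200_141GB": "H200GPUs",
--       "NVIDIA_GB200": "B200GPUs",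
--       "NVIDIA_TESLA_T4": "T4GPUs",
--       "TPU_V6e": "V6ETPU",
--       "TPU_V5e": "V5ETPU",
--       "TPU_V3": "V3TPUs",
--   }
--   default_training_accelerator_map = {
--       key: f"CustomModelTraining{accelerator_map[key]}PerProjectPerRegion"
--       for key in accelerator_map
--   }
--   dws_training_accelerator_map = {
--       key: (
--           f"CustomModelTrainingPreemptible{accelerator_map[key]}PerProjectPerRegion"
--       )
--       for key in accelerator_map
--   }
--   restricted_image_training_accelerator_map = {
--       "NVIDIA_A100_80GB": (
--           "RestrictedImageTrainingA10080GBGPUsPerProjectPerRegion"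
--       ),
--   }
--   spot_serving_accelerator_map = {
--       key: (
--           f"CustomModelServingPreemptible{accelerator_map[key]}PerProjectPerRegion"
--       )
--       for key in accelerator_map
--   }
--   serving_accelerator_map = {
--       key: f"CustomModelServing{accelerator_map[key]}PerProjectPerRegion"
--       for key in accelerator_map
--   }
--
--   if is_for_training:
--     if is_restricted_image and is_dynamic_workload_scheduler:
--       raise ValueError(
--           "Dynamic Workload Scheduler does not work for restricted image"
--           " training."
--       )
--     training_accelerator_map = (
--         restricted_image_training_accelerator_map
--         if is_restricted_image
--         else default_training_accelerator_map
--     )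
--     if accelerator_type in training_accelerator_map:
--       if is_dynamic_workload_scheduler:
--         return dws_training_accelerator_map[accelerator_type]
--       else:
--         return training_accelerator_map[accelerator_type]
--     else:
--       raise ValueError(
--           f"Could not find accelerator type: {accelerator_type} for training."
--       )
--   else:
--     if is_dynamic_workload_scheduler:
--       raise ValueError("Dynamic Workload Scheduler does not work for serving.")
--     accelerator_map = (
--         spot_serving_accelerator_map if is_spot else serving_accelerator_map
--     )
--     if accelerator_type in accelerator_map:
--       return accelerator_map[accelerator_type]
--     else:
--       raise ValueError(
--           f"Could not find accelerator type: {accelerator_type} for serving."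
--       )
-- ===== SOURCE B (Python) =====
-- ACCELERATORS = {
--     "NVIDIA_TESLA_V100": "V100GPUs",
--     "NVIDIA_TESLA_P100": "P100GPUs",
--     "NVIDIA_L4": "L4GPUs",
--     "NVIDIA_TESLA_A100": "A100GPUs",
--     "NVIDIA_A100_80GB": "A10080GBGPUs",
--     "NVIDIA_H100_80GB": "H100GPUs",
--     "NVIDIA_H100_MEGA_80GB": "H100MEGAGPUs",
--     "NVIDIA_H200_141GB": "H200GPUs",
--     "NVIDIA_GB200": "B200GPUs",
--     "NVIDIA_TESLA_T4": "T4GPUs",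
--     "TPU_V6e": "V6ETPU",
--     "TPU_V5e": "V5ETPU",
--     "TPU_V3": "V3TPUs",
-- }
--
-- # prefix keyed by (is_for_training, restricted-training?, dws-if-training-else-spot)
-- PREFIXES = {
--     (True, True, False): "RestrictedImageTraining",
--     (True, False, True): "CustomModelTrainingPreemptible",
--     (True, False, False): "CustomModelTraining",
--     (False, False, True): "CustomModelServingPreemptible",
--     (False, False, False): "CustomModelServing",
-- }
--
--
-- def get_quota_id(
--     accelerator_type: str,
--     is_for_training: bool,
--     is_spot: bool = False,
--     is_restricted_image: bool = False,
--     is_dynamic_workload_scheduler: bool = False,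
-- ) -> str:
--   """Returns the quota id for a given accelerator type and the use case."""
--   if is_dynamic_workload_scheduler:
--     if not is_for_training:
--       raise ValueError("Dynamic Workload Scheduler does not work for serving.")
--     if is_restricted_image:
--       raise ValueError(
--           "Dynamic Workload Scheduler does not work for restricted image"
--           " training."
--       )
--   restricted = is_for_training and is_restricted_image
--   if accelerator_type not in ACCELERATORS or (
--       restricted and accelerator_type != "NVIDIA_A100_80GB"
--   ):
--     use_case = "training" if is_for_training else "serving"
--     raise ValueError(
--         f"Could not find accelerator type: {accelerator_type} for {use_case}."
--     )
--   key = (is_for_training, restricted,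
--          is_dynamic_workload_scheduler if is_for_training else is_spot)
--   return PREFIXES[key] + ACCELERATORS[accelerator_type] + "PerProjectPerRegion"
-- ===== Notes on version B (the rewrite author's own statement) =====
-- stated objective: alternative
-- what changed: Replaces A's per-call construction of four derived dictionaries and its branch-per-case return tree with hoisted error guards followed by one uniform return formula prefix+short+suffix, the prefix looked up in a small module-level table keyed by the flag tuple (restricted training fits the same formula since it only accepts NVIDIA_A100_80GB).
import Mathlib
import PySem

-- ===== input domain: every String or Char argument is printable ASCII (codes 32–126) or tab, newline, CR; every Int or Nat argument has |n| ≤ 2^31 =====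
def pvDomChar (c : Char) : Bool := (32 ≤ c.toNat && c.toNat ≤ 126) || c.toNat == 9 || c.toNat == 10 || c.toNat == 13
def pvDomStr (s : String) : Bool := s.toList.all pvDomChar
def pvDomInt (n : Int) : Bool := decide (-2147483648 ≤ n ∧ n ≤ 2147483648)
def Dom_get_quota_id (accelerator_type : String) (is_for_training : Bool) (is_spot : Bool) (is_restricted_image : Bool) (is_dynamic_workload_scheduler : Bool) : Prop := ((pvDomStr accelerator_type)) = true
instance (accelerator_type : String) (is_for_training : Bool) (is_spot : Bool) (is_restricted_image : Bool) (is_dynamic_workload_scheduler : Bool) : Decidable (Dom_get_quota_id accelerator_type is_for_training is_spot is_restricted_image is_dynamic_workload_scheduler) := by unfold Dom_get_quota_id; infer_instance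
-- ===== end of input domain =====

-- B replaces A's four derived per-call dictionaries and branch-per-case returns with hoisted error
-- guards and one uniform formula prefix ++ short ++ suffix, the prefix from a table keyed by the
-- flag tuple (objective: alternative). Equivalence is over the return value; A raises ValueError on
-- the inputs Pre_ excludes.

-- ===== PORT A =====
-- literal transliteration of A: base dict plus four derived dicts built by comprehension (fold over keys);
-- where A raises ValueError the port returns "" (those inputs lie outside Pre_).
def get_quota_id (accelerator_type : String) (is_for_training : Bool) (is_spot : Bool) (is_restricted_image : Bool) (is_dynamic_workload_scheduler : Bool) : String :=
  let accelerator_map : PySem.Dict String String := PySem.Dict.ofList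
    [("NVIDIA_TESLA_V100", "V100GPUs"), ("NVIDIA_TESLA_P100", "P100GPUs"),
     ("NVIDIA_L4", "L4GPUs"), ("NVIDIA_TESLA_A100", "A100GPUs"),
     ("NVIDIA_A100_80GB", "A10080GBGPUs"), ("NVIDIA_H100_80GB", "H100GPUs"),
     ("NVIDIA_H100_MEGA_80GB", "H100MEGAGPUs"), ("NVIDIA_H200_141GB", "H200GPUs"),
     ("NVIDIA_GB200", "B200GPUs"), ("NVIDIA_TESLA_T4", "T4GPUs"),
     ("TPU_V6e", "V6ETPU"), ("TPU_V5e", "V5ETPU"), ("TPU_V3", "V3TPUs")]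
  let default_training_accelerator_map : PySem.Dict String String :=
    accelerator_map.keys.foldl (fun d key =>
      d.insert key ("CustomModelTraining" ++ accelerator_map.getD key "" ++ "PerProjectPerRegion")) PySem.Dict.empty
  let dws_training_accelerator_map : PySem.Dict String String :=
    accelerator_map.keys.foldl (fun d key =>
      d.insert key ("CustomModelTrainingPreemptible" ++ accelerator_map.getD key "" ++ "PerProjectPerRegion")) PySem.Dict.empty
  let restricted_image_training_accelerator_map : PySem.Dict String String := PySem.Dict.ofList
    [("NVIDIA_A100_80GB", "RestrictedImageTrainingA10080GBGPUsPerProjectPerRegion")]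
  let spot_serving_accelerator_map : PySem.Dict String String :=
    accelerator_map.keys.foldl (fun d key =>
      d.insert key ("CustomModelServingPreemptible" ++ accelerator_map.getD key "" ++ "PerProjectPerRegion")) PySem.Dict.empty
  let serving_accelerator_map : PySem.Dict String String :=
    accelerator_map.keys.foldl (fun d key =>
      d.insert key ("CustomModelServing" ++ accelerator_map.getD key "" ++ "PerProjectPerRegion")) PySem.Dict.empty
  if is_for_training then
    if is_restricted_image && is_dynamic_workload_scheduler then "" -- raise ValueError
    else
      let training_accelerator_map :=
        if is_restricted_image then restricted_image_training_accelerator_map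
        else default_training_accelerator_map
      if training_accelerator_map.contains accelerator_type then
        if is_dynamic_workload_scheduler then
          dws_training_accelerator_map.getD accelerator_type ""
        else
          training_accelerator_map.getD accelerator_type ""
      else "" -- raise ValueError
  else
    if is_dynamic_workload_scheduler then "" -- raise ValueError
    else
      let accelerator_map2 :=
        if is_spot then spot_serving_accelerator_map else serving_accelerator_map
      if accelerator_map2.contains accelerator_type then
        accelerator_map2.getD accelerator_type ""
      else "" -- raise ValueError

-- ===== PORT B =====
-- literal transliteration of Source B: hoisted guards, then one uniform formula
-- PREFIXES[flag key] ++ ACCELERATORS[type] ++ "PerProjectPerRegion";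
-- "" stands for the ValueError branches (outside Pre_).
def get_quota_id_alt (accelerator_type : String) (is_for_training : Bool) (is_spot : Bool) (is_restricted_image : Bool) (is_dynamic_workload_scheduler : Bool) : String :=
  let ACCELERATORS : PySem.Dict String String := PySem.Dict.ofList
    [("NVIDIA_TESLA_V100", "V100GPUs"), ("NVIDIA_TESLA_P100", "P100GPUs"),
     ("NVIDIA_L4", "L4GPUs"), ("NVIDIA_TESLA_A100", "A100GPUs"),
     ("NVIDIA_A100_80GB", "A10080GBGPUs"), ("NVIDIA_H100_80GB", "H100GPUs"),
     ("NVIDIA_H100_MEGA_80GB", "H100MEGAGPUs"), ("NVIDIA_H200_141GB", "H200GPUs"),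
     ("NVIDIA_GB200", "B200GPUs"), ("NVIDIA_TESLA_T4", "T4GPUs"),
     ("TPU_V6e", "V6ETPU"), ("TPU_V5e", "V5ETPU"), ("TPU_V3", "V3TPUs")]
  let PREFIXES : PySem.Dict (Bool × Bool × Bool) String := PySem.Dict.ofList
    [((true, true, false), "RestrictedImageTraining"),
     ((true, false, true), "CustomModelTrainingPreemptible"),
     ((true, false, false), "CustomModelTraining"),
     ((false, false, true), "CustomModelServingPreemptible"),
     ((false, false, false), "CustomModelServing")]
  if is_dynamic_workload_scheduler && !is_for_training then "" -- raise ValueError (serving)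
  else if is_dynamic_workload_scheduler && is_restricted_image then "" -- raise ValueError (restricted)
  else
    let restricted := is_for_training && is_restricted_image
    if !(ACCELERATORS.contains accelerator_type)
        || (restricted && accelerator_type ≠ "NVIDIA_A100_80GB") then "" -- raise ValueError (unknown type)
    else
      let key := (is_for_training, restricted,
        if is_for_training then is_dynamic_workload_scheduler else is_spot)
      PREFIXES.getD key "" ++ ACCELERATORS.getD accelerator_type "" ++ "PerProjectPerRegion"

-- ===== PRECONDITION & SPEC =====
-- Pre_ excludes exactly the inputs on which A raises ValueError: restricted training with DWS, serving
-- with DWS, and any accelerator_type outside the known map (restricted training accepts only NVIDIA_A100_80GB).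
def Pre_get_quota_id (accelerator_type : String) (is_for_training : Bool) (is_spot : Bool) (is_restricted_image : Bool) (is_dynamic_workload_scheduler : Bool) : Prop :=
  if is_for_training then
    if is_restricted_image then
      is_dynamic_workload_scheduler = false ∧ accelerator_type = "NVIDIA_A100_80GB"
    else
      accelerator_type ∈ ["NVIDIA_TESLA_V100", "NVIDIA_TESLA_P100", "NVIDIA_L4",
        "NVIDIA_TESLA_A100", "NVIDIA_A100_80GB", "NVIDIA_H100_80GB", "NVIDIA_H100_MEGA_80GB",
        "NVIDIA_H200_141GB", "NVIDIA_GB200", "NVIDIA_TESLA_T4", "TPU_V6e", "TPU_V5e", "TPU_V3"]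
  else
    is_dynamic_workload_scheduler = false ∧
      accelerator_type ∈ ["NVIDIA_TESLA_V100", "NVIDIA_TESLA_P100", "NVIDIA_L4",
        "NVIDIA_TESLA_A100", "NVIDIA_A100_80GB", "NVIDIA_H100_80GB", "NVIDIA_H100_MEGA_80GB",
        "NVIDIA_H200_141GB", "NVIDIA_GB200", "NVIDIA_TESLA_T4", "TPU_V6e", "TPU_V5e", "TPU_V3"]
instance (accelerator_type : String) (is_for_training : Bool) (is_spot : Bool) (is_restricted_image : Bool) (is_dynamic_workload_scheduler : Bool) : Decidable (Pre_get_quota_id accelerator_type is_for_training is_spot is_restricted_image is_dynamic_workload_scheduler) := by unfold Pre_get_quota_id; infer_instance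

def pvWitness_get_quota_id : String × Bool × Bool × Bool × Bool := ("NVIDIA_TESLA_V100", true, false, false, false)

def Spec_get_quota_id (accelerator_type : String) (is_for_training : Bool) (is_spot : Bool) (is_restricted_image : Bool) (is_dynamic_workload_scheduler : Bool) (out : String) : Prop := out = get_quota_id_alt accelerator_type is_for_training is_spot is_restricted_image is_dynamic_workload_scheduler
instance (accelerator_type : String) (is_for_training : Bool) (is_spot : Bool) (is_restricted_image : Bool) (is_dynamic_workload_scheduler : Bool) (out : String) : Decidable (Spec_get_quota_id accelerator_type is_for_training is_spot is_restricted_image is_dynamic_workload_scheduler out) := by unfold Spec_get_quota_id; infer_instance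

-- ===== CLAIM (what is proved, stated in full; the proofs are below) =====
def Claim_equal_get_quota_id : Prop := ∀ (accelerator_type : String) (is_for_training : Bool) (is_spot : Bool) (is_restricted_image : Bool) (is_dynamic_workload_scheduler : Bool), Dom_get_quota_id accelerator_type is_for_training is_spot is_restricted_image is_dynamic_workload_scheduler → Pre_get_quota_id accelerator_type is_for_training is_spot is_restricted_image is_dynamic_workload_scheduler → Spec_get_quota_id accelerator_type is_for_training is_spot is_restricted_image is_dynamic_workload_scheduler (get_quota_id accelerator_type is_for_training is_spot is_restricted_image is_dynamic_workload_scheduler)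

-- ===== LEMMAS AND PROOFS =====

-- ===== VERDICT (by name: the statement is the Claim_ definition above) =====
theorem get_quota_id_spec : Claim_equal_get_quota_id := by
  intro t ft sp ri dws _ hpre
  unfold Spec_get_quota_id
  unfold Pre_get_quota_id at hpre
  cases ft <;> cases ri <;> cases dws <;> cases sp <;>
    simp only [if_true, if_false, Bool.false_eq_true, List.mem_cons,
      List.not_mem_nil, or_false] at hpre <;>
    first
    | (rcases hpre with ⟨h1, _⟩; exact absurd h1 (by decide))
    | (rcases hpre with ⟨_, hm⟩ <;>
       rcases hm with rfl | rfl | rfl | rfl | rfl | rfl | rfl | rfl | rfl | rfl | rfl | rfl | rfl <;> decide)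
    | (rcases hpre with rfl | rfl | rfl | rfl | rfl | rfl | rfl | rfl | rfl | rfl | rfl | rfl | rfl <;> decide)
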